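-- pv_equiv track=rewrite | github.com/andreitablan/Python | Laborator_3/main.py | unique_not_unique
-- ===== SOURCE A (Python) =====
-- def unique_not_unique(list):
--     dict = {}
--     a = 0
--     b = 0
--     for element in list:
--         if element not in dict:
--             dict[element] = 1
--         else:
--             dict[element] += 1
--     for key in dict:
--         if dict[key] == 1:
--             a += 1
--         else:
--             b += 1
--     return a, b
-- ===== SOURCE B (Python) =====
-- def unique_not_unique(list):
--     seen = set()
--     duplicates = set()
--     for element in list:
--         if element in seen:
--             duplicates.add(element)
--         else:
--             seen.add(element)
--     return len(seen) - len(duplicates), len(duplicates)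
-- ===== Notes on version B (the rewrite author's own statement) =====
-- stated objective: alternative
-- what changed: Replaces the count-dict build followed by a second loop over the keys with a single pass maintaining two membership sets (seen, duplicates) and derives both counts from the set sizes.
import Mathlib
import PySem

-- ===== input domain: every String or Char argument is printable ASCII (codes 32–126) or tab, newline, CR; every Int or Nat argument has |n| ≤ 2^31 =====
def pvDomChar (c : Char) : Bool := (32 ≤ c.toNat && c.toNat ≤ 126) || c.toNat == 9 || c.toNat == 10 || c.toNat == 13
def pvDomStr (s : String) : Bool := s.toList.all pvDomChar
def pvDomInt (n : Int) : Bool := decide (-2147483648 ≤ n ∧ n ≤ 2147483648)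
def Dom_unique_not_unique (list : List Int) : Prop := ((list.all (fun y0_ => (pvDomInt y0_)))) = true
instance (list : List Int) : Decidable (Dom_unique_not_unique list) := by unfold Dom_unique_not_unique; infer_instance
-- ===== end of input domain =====

-- B replaces the count-dict plus second key-loop with a single pass maintaining two membership sets; alternative decomposition, same cost.


-- ===== PORT A =====
def unique_not_unique (list : List Int) : Int × Int :=
  let d := list.foldl
    (fun (d : PySem.Dict Int Int) element =>
      if d.contains element = false then d.insert element 1
      else d.modify element 0 (· + 1))
    PySem.Dict.empty
  d.keys.foldl
    (fun (ab : Int × Int) key =>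
      if d.getD key 0 = 1 then (ab.1 + 1, ab.2) else (ab.1, ab.2 + 1))
    (0, 0)

-- ===== PORT B =====
def unique_not_unique_alt (list : List Int) : Int × Int :=
  let r := list.foldl
    (fun (p : PySem.Set Int × PySem.Set Int) element =>
      if PySem.Set.contains p.1 element then (p.1, PySem.Set.add p.2 element)
      else (PySem.Set.add p.1 element, p.2))
    (PySem.Set.empty, PySem.Set.empty)
  (PySem.Set.len r.1 - PySem.Set.len r.2, PySem.Set.len r.2)

-- ===== PRECONDITION & SPEC =====
def Spec_unique_not_unique (list : List Int) (out : Int × Int) : Prop := out = unique_not_unique_alt list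
instance (list : List Int) (out : Int × Int) : Decidable (Spec_unique_not_unique list out) := by unfold Spec_unique_not_unique; infer_instance

-- ===== CLAIM (what is proved, stated in full; the proofs are below) =====
def Claim_equal_unique_not_unique : Prop := ∀ (list : List Int), Dom_unique_not_unique list → Spec_unique_not_unique list (unique_not_unique list)

-- ===== LEMMAS AND PROOFS =====

-- A's dict loop is Counter(list): the fresh-key insert branch coincides with modify.
theorem insert_one_eq_modify (d : PySem.Dict Int Int) (e : Int) (h : d.contains e = false) :
    d.insert e 1 = d.modify e 0 (· + 1) := by
  have h0 : d.getD e 0 = 0 := PySem.Dict.getD_of_not_contains d 0 h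
  simp [PySem.Dict.insert, PySem.Dict.modify, h, h0]

theorem foldA_eq_counter (l : List Int) (d : PySem.Dict Int Int) :
    l.foldl
      (fun (d : PySem.Dict Int Int) element =>
        if d.contains element = false then d.insert element 1
        else d.modify element 0 (· + 1)) d
    = l.foldl (fun d x => d.modify x 0 (· + 1)) d := by
  induction l generalizing d with
  | nil => rfl
  | cons y t ih =>
      by_cases h : d.contains y = false
      · simp [List.foldl_cons, h, insert_one_eq_modify d y h, ih]
      · simp [List.foldl_cons, h, ih]

-- A's second loop counts keys with value 1 into .1 and the rest into .2.
theorem pair_count_fold (ks : List Int) (p : Int → Prop) [DecidablePred p] (a0 b0 : Int) :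
    ks.foldl (fun (ab : Int × Int) k =>
        if p k then (ab.1 + 1, ab.2) else (ab.1, ab.2 + 1)) (a0, b0)
    = (a0 + (ks.countP (fun k => decide (p k)) : Int),
       b0 + (ks.countP (fun k => !decide (p k)) : Int)) := by
  induction ks generalizing a0 b0 with
  | nil => simp
  | cons y t ih =>
      by_cases h : p y
      · simp [List.foldl_cons, h, ih]
        ring
      · simp [List.foldl_cons, h, ih]
        ring

-- B's loop invariant: the seen set accumulates every element; the duplicate set
-- holds exactly the elements seen at least twice, with no duplicates itself.
theorem foldB_inv (l : List Int) (s du : PySem.Set Int) (hs : s.Nodup) (hdu : du.Nodup) :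
    (l.foldl
      (fun (p : PySem.Set Int × PySem.Set Int) element =>
        if PySem.Set.contains p.1 element then (p.1, PySem.Set.add p.2 element)
        else (PySem.Set.add p.1 element, p.2)) (s, du)).1 = PySem.Set.update s l
    ∧ (l.foldl
      (fun (p : PySem.Set Int × PySem.Set Int) element =>
        if PySem.Set.contains p.1 element then (p.1, PySem.Set.add p.2 element)
        else (PySem.Set.add p.1 element, p.2)) (s, du)).2.Nodup
    ∧ ∀ x, x ∈ (l.foldl
      (fun (p : PySem.Set Int × PySem.Set Int) element =>
        if PySem.Set.contains p.1 element then (p.1, PySem.Set.add p.2 element)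
        else (PySem.Set.add p.1 element, p.2)) (s, du)).2
        ↔ x ∈ du ∨ (x ∈ s ∧ x ∈ l) ∨ (x ∈ l ∧ 2 ≤ l.count x) := by
  induction l generalizing s du with
  | nil => exact ⟨rfl, hdu, by simp⟩
  | cons y t ih =>
      by_cases h : y ∈ s
      · have hc : PySem.Set.contains s y = true := (PySem.Set.contains_iff s y).2 h
        obtain ⟨h1, h2, h3⟩ := ih s (PySem.Set.add du y) hs (PySem.Set.nodup_add _ _ hdu)
        have hstep : ((y :: t).foldl
            (fun (p : PySem.Set Int × PySem.Set Int) element =>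
              if PySem.Set.contains p.1 element then (p.1, PySem.Set.add p.2 element)
              else (PySem.Set.add p.1 element, p.2)) (s, du))
          = (t.foldl
            (fun (p : PySem.Set Int × PySem.Set Int) element =>
              if PySem.Set.contains p.1 element then (p.1, PySem.Set.add p.2 element)
              else (PySem.Set.add p.1 element, p.2)) (s, PySem.Set.add du y)) := by
          rw [List.foldl_cons]
          simp only [hc, if_pos]
        rw [hstep]
        refine ⟨?_, h2, ?_⟩
        · rw [h1]
          simp [PySem.Set.update, PySem.Set.add_of_mem h]
        · intro x
          rw [h3 x]
          by_cases hxy : x = y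
          · subst hxy
            simp [PySem.Set.mem_add, h]
          · have hyx : ¬ y = x := fun e => hxy e.symm
            simp [PySem.Set.mem_add, hxy, hyx]
      · have hc : PySem.Set.contains s y = false := by
          by_contra hcc
          exact h ((PySem.Set.contains_iff s y).1 (by simpa using hcc))
        obtain ⟨h1, h2, h3⟩ := ih (PySem.Set.add s y) du (PySem.Set.nodup_add _ _ hs) hdu
        have hstep : ((y :: t).foldl
            (fun (p : PySem.Set Int × PySem.Set Int) element =>
              if PySem.Set.contains p.1 element then (p.1, PySem.Set.add p.2 element)
              else (PySem.Set.add p.1 element, p.2)) (s, du))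
          = (t.foldl
            (fun (p : PySem.Set Int × PySem.Set Int) element =>
              if PySem.Set.contains p.1 element then (p.1, PySem.Set.add p.2 element)
              else (PySem.Set.add p.1 element, p.2)) (PySem.Set.add s y, du)) := by
          rw [List.foldl_cons]
          simp only [hc, Bool.false_eq_true, if_false]
        rw [hstep]
        refine ⟨?_, h2, ?_⟩
        · rw [h1]
          simp [PySem.Set.update]
        · intro x
          rw [h3 x]
          by_cases hxy : x = y
          · subst hxy
            have hcnt : (2 ≤ (x :: t).count x) ↔ x ∈ t := by
              simp
            simp [h]
            tauto
          · have hyx : ¬ y = x := fun e => hxy e.symm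
            simp [PySem.Set.mem_add, hxy, hyx]

theorem countP_sum (l : List Int) (p : Int → Bool) :
    l.countP p + l.countP (fun x => !p x) = l.length := by
  have := List.length_eq_countP_add_countP (p := fun x => p x) (l := l)
  simpa using this.symm

-- ===== VERDICT (by name: the statement is the Claim_ definition above) =====
theorem unique_not_unique_spec : Claim_equal_unique_not_unique := by
  intro l _
  show unique_not_unique l = unique_not_unique_alt l
  -- A side
  unfold unique_not_unique unique_not_unique_alt
  simp only [foldA_eq_counter, ← PySem.Dict.counter_eq_foldl]
  rw [pair_count_fold]
  -- characterise A's components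
  have hkeys : (PySem.Dict.counter l).keys = PySem.Set.ofList l := PySem.Dict.keys_counter l
  -- B side
  obtain ⟨h1, h2, h3⟩ := foldB_inv l PySem.Set.empty PySem.Set.empty (by simp [PySem.Set.empty]) (by simp [PySem.Set.empty])
  set r := l.foldl
      (fun (p : PySem.Set Int × PySem.Set Int) element =>
        if PySem.Set.contains p.1 element then (p.1, PySem.Set.add p.2 element)
        else (PySem.Set.add p.1 element, p.2)) (PySem.Set.empty, PySem.Set.empty) with hr
  have hseen : r.1 = PySem.Set.ofList l := by
    rw [h1, PySem.Set.ofList_eq_foldl]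
    simp [PySem.Set.update, PySem.Set.empty]
  -- r.2 has the same members as the distinct elements with count ≥ 2
  have hmem : ∀ x, x ∈ r.2 ↔ x ∈ (PySem.Set.ofList l).filter (fun x => decide (2 ≤ l.count x)) := by
    intro x
    rw [h3 x]
    simp [PySem.Set.mem_ofList, List.mem_filter, PySem.Set.empty]
  have hlen2 : r.2.length = (PySem.Set.ofList l).countP (fun x => decide (2 ≤ l.count x)) := by
    rw [List.Perm.length_eq ((List.perm_ext_iff_of_nodup h2
      (List.Nodup.filter _ (PySem.Set.nodup_ofList l))).2 hmem)]
    exact Eq.symm List.countP_eq_length_filter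
  -- the two count predicates agree on members of the key set
  have hcongr1 : (PySem.Set.ofList l).countP (fun k => decide ((PySem.Dict.counter l).getD k 0 = 1))
      = (PySem.Set.ofList l).countP (fun x => !decide (2 ≤ l.count x)) := by
    apply List.countP_congr
    intro k hk
    have hk' : k ∈ l := (PySem.Set.mem_ofList l k).1 hk
    have hpos : 1 ≤ l.count k := List.count_pos_iff.2 hk'
    simp [PySem.Dict.getD_counter]
    omega
  have hcongr2 : (PySem.Set.ofList l).countP (fun k => !decide ((PySem.Dict.counter l).getD k 0 = 1))
      = (PySem.Set.ofList l).countP (fun x => decide (2 ≤ l.count x)) := by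
    apply List.countP_congr
    intro k hk
    have hk' : k ∈ l := (PySem.Set.mem_ofList l k).1 hk
    have hpos : 1 ≤ l.count k := List.count_pos_iff.2 hk'
    simp [PySem.Dict.getD_counter]
    omega
  have hsum := countP_sum (PySem.Set.ofList l) (fun x => decide (2 ≤ l.count x))
  rw [hkeys]
  simp only [PySem.Set.len, hseen, hcongr1, hcongr2, hlen2]
  simp only [Prod.mk.injEq]
  refine ⟨?_, ?_⟩ <;> omega
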